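-- pv_equiv track=rewrite | github.com/earthastronaut/python_morsels | minion_game/minion.py | get_minion_game_winner
-- ===== SOURCE A (Python) =====
-- class const:
--     Draw = "Draw"
--
-- def get_minion_game_winner(string):
--     vowels = set("AEIOU")
--     scores = {
--         True: 0,
--         False: 0,
--     }
--
--     nchars = len(string)
--     for i in range(nchars):
--         is_vowel = string[i] in vowels
--         scores[is_vowel] += (nchars - i)
--
--     is_vowel = True
--     score_vowel = scores[is_vowel]
--     score_not_vowel = scores[not is_vowel]
--     if score_vowel == score_not_vowel:
--         return const.Draw, None
--     elif score_vowel > score_not_vowel: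
--         return "Kevin", score_vowel
--     else:
--         return "Stuart", score_not_vowel
-- ===== SOURCE B (Python) =====
-- def get_minion_game_winner(string):
--     # Count substrings grouped by END position: substrings ending at j that
--     # start with a vowel = number of vowels in string[:j+1]. So keep running
--     # prefix counts and accumulate them -- no indices or weights needed.
--     kevin = stuart = vowels_seen = consonants_seen = 0
--     for c in string:
--         if c in "AEIOU":
--             vowels_seen += 1
--         else:
--             consonants_seen += 1
--         kevin += vowels_seen
--         stuart += consonants_seen
--     if kevin == stuart:
--         return "Draw", None
--     elif kevin > stuart:
--         return "Kevin", kevin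
--     else:
--         return "Stuart", stuart
-- ===== Notes on version B (the rewrite author's own statement) =====
-- stated objective: alternative
-- what changed: B counts substrings grouped by END position via running prefix counts of vowels/consonants seen so far (kevin += vowels_seen each step), instead of A's per-start-index positional weighting scores[is_vowel] += n - i over range(n); no indexing, len arithmetic or dict buckets are used.
import Mathlib
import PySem

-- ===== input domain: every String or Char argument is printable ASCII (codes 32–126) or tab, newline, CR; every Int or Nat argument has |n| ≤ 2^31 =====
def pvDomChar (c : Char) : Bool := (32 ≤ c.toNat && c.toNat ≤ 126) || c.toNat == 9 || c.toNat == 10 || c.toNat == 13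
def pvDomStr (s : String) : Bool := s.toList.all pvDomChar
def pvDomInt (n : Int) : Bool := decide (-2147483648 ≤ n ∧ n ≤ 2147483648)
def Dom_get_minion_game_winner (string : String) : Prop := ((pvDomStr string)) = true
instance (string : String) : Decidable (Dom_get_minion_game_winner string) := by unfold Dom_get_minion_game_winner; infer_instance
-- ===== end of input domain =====

-- B counts substrings by END position with running prefix counts of vowels/consonants,
-- instead of A's per-start-index weighting (n - i) into a two-bucket score table.

-- ===== PORT A =====
-- scores = {True: 0, False: 0} is modelled as the pair (scores[True], scores[False]).
def get_minion_game_winner (string : String) : String × Option Int :=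
  let vowels : PySem.Set Char := PySem.Set.ofList "AEIOU".toList
  let nchars : Int := string.toList.length
  let scores : Int × Int :=
    (PySem.List.enumerate string.toList).foldl
      (fun (sc : Int × Int) (p : Int × Char) =>
        let is_vowel : Bool := p.2 ∈ vowels
        if is_vowel then (sc.1 + (nchars - p.1), sc.2) else (sc.1, sc.2 + (nchars - p.1)))
      (0, 0)
  let score_vowel := scores.1
  let score_not_vowel := scores.2
  if score_vowel = score_not_vowel then ("Draw", none)
  else if score_vowel > score_not_vowel then ("Kevin", some score_vowel)
  else ("Stuart", some score_not_vowel)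

-- ===== PORT B =====
-- state = (kevin, stuart, vowels_seen, consonants_seen)
def get_minion_game_winner_alt (string : String) : String × Option Int :=
  let st : Int × Int × Int × Int :=
    string.toList.foldl
      (fun (st : Int × Int × Int × Int) (c : Char) =>
        let vs := if c ∈ ("AEIOU".toList : List Char) then st.2.2.1 + 1 else st.2.2.1
        let cs := if c ∈ ("AEIOU".toList : List Char) then st.2.2.2 else st.2.2.2 + 1
        (st.1 + vs, st.2.1 + cs, vs, cs))
      (0, 0, 0, 0)
  let kevin := st.1
  let stuart := st.2.1
  if kevin = stuart then ("Draw", none)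
  else if kevin > stuart then ("Kevin", some kevin)
  else ("Stuart", some stuart)

-- ===== PRECONDITION & SPEC =====
def Spec_get_minion_game_winner (string : String) (out : String × Option Int) : Prop := out = get_minion_game_winner_alt string
instance (string : String) (out : String × Option Int) : Decidable (Spec_get_minion_game_winner string out) := by unfold Spec_get_minion_game_winner; infer_instance

-- ===== CLAIM (what is proved, stated in full; the proofs are below) =====
def Claim_equal_get_minion_game_winner : Prop := ∀ (string : String), Dom_get_minion_game_winner string → Spec_get_minion_game_winner string (get_minion_game_winner string)

-- ===== LEMMAS AND PROOFS =====

-- Structural reference values: K l = Kevin's score of l, S l = Stuart's score of l,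
-- with head weight 1 + |tail| (the number of substrings starting at the head).
def pvK : List Char → Int
  | [] => 0
  | c :: r => (if c ∈ ("AEIOU".toList : List Char) then (r.length : Int) + 1 else 0) + pvK r

def pvS : List Char → Int
  | [] => 0
  | c :: r => (if c ∈ ("AEIOU".toList : List Char) then 0 else (r.length : Int) + 1) + pvS r

def pvV : List Char → Int
  | [] => 0
  | c :: r => (if c ∈ ("AEIOU".toList : List Char) then 1 else 0) + pvV r

def pvC : List Char → Int
  | [] => 0
  | c :: r => (if c ∈ ("AEIOU".toList : List Char) then 0 else 1) + pvC r

lemma mem_set_vowels (c : Char) :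
    (c ∈ PySem.Set.ofList "AEIOU".toList) ↔ c ∈ ("AEIOU".toList : List Char) := by
  simp [PySem.Set.mem_ofList]

-- A's loop: with weights n - i over enumerate l k where n - k = |l|, it accumulates (pvK, pvS).
lemma aLoop_eq (n : Int) : ∀ (l : List Char) (k : Int), n - k = (l.length : Int) →
    ∀ sv sc : Int,
    (PySem.List.enumerate l k).foldl
      (fun (sc : Int × Int) (p : Int × Char) =>
        let is_vowel : Bool := p.2 ∈ PySem.Set.ofList "AEIOU".toList
        if is_vowel then (sc.1 + (n - p.1), sc.2) else (sc.1, sc.2 + (n - p.1)))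
      (sv, sc)
    = (sv + pvK l, sc + pvS l) := by
  intro l
  induction l with
  | nil => intro k hk sv sc; simp [PySem.List.enumerate_nil, pvK, pvS]
  | cons c r ih =>
    intro k hk sv sc
    have hd : (decide (c ∈ PySem.Set.ofList "AEIOU".toList))
        = (decide (c ∈ ("AEIOU".toList : List Char))) :=
      decide_eq_decide.mpr (mem_set_vowels c)
    have hk' : n - (k + 1) = (r.length : Int) := by
      simp only [List.length_cons] at hk; push_cast at hk ⊢; linarith
    rw [PySem.List.enumerate_cons, List.foldl_cons, hd]
    by_cases h : c ∈ ("AEIOU".toList : List Char) <;>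
      simp only [h, decide_true, decide_false, Bool.false_eq_true, if_true, if_false,
        pvK, pvS, ih (k + 1) hk'] <;>
      simp only [Prod.mk.injEq] <;>
      constructor <;> [skip; skip; skip; skip] <;>
      (try (simp only [List.length_cons] at hk; push_cast at hk ⊢; linarith))
  
-- B's loop invariant.
lemma bLoop_eq : ∀ (l : List Char) (kv st v cs : Int),
    l.foldl
      (fun (st : Int × Int × Int × Int) (c : Char) =>
        let vs := if c ∈ ("AEIOU".toList : List Char) then st.2.2.1 + 1 else st.2.2.1
        let cs := if c ∈ ("AEIOU".toList : List Char) then st.2.2.2 else st.2.2.2 + 1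
        (st.1 + vs, st.2.1 + cs, vs, cs))
      (kv, st, v, cs)
    = (kv + v * l.length + pvK l, st + cs * l.length + pvS l, v + pvV l, cs + pvC l) := by
  intro l
  induction l with
  | nil => intro kv st v cs; simp [pvK, pvS, pvV, pvC]
  | cons c r ih =>
    intro kv st v cs
    simp only [List.foldl_cons, List.length_cons]
    by_cases h : c ∈ ("AEIOU".toList : List Char) <;>
      simp only [h, if_true, if_false, pvK, pvS, pvV, pvC, ih] <;>
      simp only [Prod.mk.injEq] <;>
      refine ⟨by push_cast; ring, by push_cast; ring, by ring, by ring⟩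

lemma aRes (l : List Char) :
    (PySem.List.enumerate l).foldl
      (fun (sc : Int × Int) (p : Int × Char) =>
        let is_vowel : Bool := p.2 ∈ PySem.Set.ofList "AEIOU".toList
        if is_vowel then (sc.1 + ((l.length : Int) - p.1), sc.2)
        else (sc.1, sc.2 + ((l.length : Int) - p.1)))
      (0, 0) = (pvK l, pvS l) := by
  simpa using aLoop_eq (l.length : Int) l 0 (by simp) 0 0

lemma bRes (l : List Char) :
    l.foldl
      (fun (st : Int × Int × Int × Int) (c : Char) =>
        let vs := if c ∈ ("AEIOU".toList : List Char) then st.2.2.1 + 1 else st.2.2.1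
        let cs := if c ∈ ("AEIOU".toList : List Char) then st.2.2.2 else st.2.2.2 + 1
        (st.1 + vs, st.2.1 + cs, vs, cs))
      (0, 0, 0, 0) = (pvK l, pvS l, pvV l, pvC l) := by
  simpa using bLoop_eq l 0 0 0 0

-- ===== VERDICT (by name: the statement is the Claim_ definition above) =====
theorem get_minion_game_winner_spec : Claim_equal_get_minion_game_winner := by
  intro s _
  unfold Spec_get_minion_game_winner get_minion_game_winner get_minion_game_winner_alt
  simp only [aRes, bRes]
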